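-- pv_equiv track=rewrite | github.com/piao0321/SE | 实验八txt/test8.py | s_match
-- ===== SOURCE A (Python) =====
-- def s_match(s, s1):
--     """匹配词语出现的位置"""
--     loc = list()
--     l_s = len(s)
--     for k in s1:
--         temp = []
--         l_s1 = len(k)
--         for i in range(l_s - l_s1 + 1):
--             index = i
--             for j in range(l_s1):
--                 if s[index] == k[j]:
--                     index += 1
--                 else:
--                     break
--             if index - i == l_s1:
--                 temp.append(i)
--         loc.extend(temp)
--     return sorted(loc)
-- ===== SOURCE B (Python) =====
-- def s_match(s, s1):
--     """Same result as A: for each word, collect all (overlapping) start positions using str.find, then sort."""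
--     loc = []
--     for k in s1:
--         i = s.find(k)
--         while i != -1:
--             loc.append(i)
--             i = s.find(k, i + 1)
--     return sorted(loc)
-- ===== Notes on version B (the rewrite author's own statement) =====
-- stated objective: faster
-- what changed: Replaces A's hand-written triple loop (every start position, char-by-char compare with an index accumulator) by a repeated str.find scan per word that jumps from one occurrence to the next; no per-position Python-level inner loop remains.
import Mathlib
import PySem

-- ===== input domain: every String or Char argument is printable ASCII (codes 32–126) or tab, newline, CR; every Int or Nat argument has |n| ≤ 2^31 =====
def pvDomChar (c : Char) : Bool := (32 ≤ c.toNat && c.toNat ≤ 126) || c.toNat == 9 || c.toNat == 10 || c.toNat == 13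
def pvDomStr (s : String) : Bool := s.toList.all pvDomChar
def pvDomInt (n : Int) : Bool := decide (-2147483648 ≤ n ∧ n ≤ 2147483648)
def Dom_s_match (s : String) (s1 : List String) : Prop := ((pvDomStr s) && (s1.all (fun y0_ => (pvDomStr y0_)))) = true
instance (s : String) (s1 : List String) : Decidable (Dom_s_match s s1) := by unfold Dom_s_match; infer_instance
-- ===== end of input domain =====

-- B replaces A's hand-written per-position character comparison by a repeated str.find scan per word
-- (C-accelerated substring search); same return value, measured constant-factor speed-up.

-- ===== PORT A =====
-- inner 'for j in range(l_s1): if s[index] == k[j]: index += 1 else: break' loop of A;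
-- s[index] and k[j] are always in range on every reachable state (index = i + j ≤ len(s) - 1, j < len(k)),
-- so comparing the two `pyGet?` options is exact.
def pvInnerA (sc kc : List Char) : List Int → Int → Int
  | [], index => index
  | j :: js, index =>
    if PySem.List.pyGet? sc index = PySem.List.pyGet? kc j then pvInnerA sc kc js (index + 1)
    else index

def s_match (s : String) (s1 : List String) : List Int :=
  let sc := s.toList
  let loc := s1.foldl (fun loc k =>
    let kc := k.toList
    let temp := (PySem.List.pyRange 0 ((sc.length : Int) - (kc.length : Int) + 1)).foldl
      (fun temp i =>
        let index := pvInnerA sc kc (PySem.List.pyRange 0 (kc.length : Int)) i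
        if index - i = (kc.length : Int) then temp ++ [i] else temp) []
    loc ++ temp) []
  PySem.List.sorted loc (fun x => x) false

-- ===== PORT B =====
-- 'i = s.find(k); while i != -1: loc.append(i); i = s.find(k, i + 1)'; the fuel only makes the
-- recursion structurally total and is never exhausted (i strictly increases and stays ≤ len(s)).
def pvFindLoop (s k : String) : Nat → Int → List Int → List Int
  | 0, _, loc => loc
  | fuel + 1, i, loc =>
    if i ≠ -1 then pvFindLoop s k fuel (PySem.Str.findFrom s k (i + 1) none) (loc ++ [i])
    else loc

def s_match_alt (s : String) (s1 : List String) : List Int :=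
  let loc := s1.foldl (fun loc k =>
    pvFindLoop s k (s.toList.length + 2) (PySem.Str.find s k) loc) []
  PySem.List.sorted loc (fun x => x) false

-- ===== PRECONDITION & SPEC =====
def Spec_s_match (s : String) (s1 : List String) (out : List Int) : Prop := out = s_match_alt s s1
instance (s : String) (s1 : List String) (out : List Int) : Decidable (Spec_s_match s s1 out) := by unfold Spec_s_match; infer_instance

-- ===== CLAIM (what is proved, stated in full; the proofs are below) =====
def Claim_equal_s_match : Prop := ∀ (s : String) (s1 : List String), Dom_s_match s s1 → Spec_s_match s s1 (s_match s s1)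

-- ===== LEMMAS AND PROOFS =====

-- the list of all start positions ≥ t at which kc occurs in sc, in increasing order
def pvOcc (sc kc : List Char) (t : Int) : List Int :=
  (PySem.List.pyRange t ((sc.length : Int) - (kc.length : Int) + 1)).filter
    (fun i => decide (kc <+: sc.drop i.toNat))

-- A's inner character loop succeeds exactly on prefix matches
lemma pvInnerA_iff (sc kc : List Char) : ∀ (d j : Nat), j + d = kc.length →
    ∀ i : Int, 0 ≤ i → i.toNat + kc.length ≤ sc.length →
    (pvInnerA sc kc (PySem.List.pyRange (j : Int) (kc.length : Int)) (i + j) = i + kc.length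
      ↔ kc.drop j <+: sc.drop (i.toNat + j)) := by
  intro d
  induction d with
  | zero =>
    intro j hj i hi hlen
    have hj' : j = kc.length := by omega
    subst hj'
    rw [PySem.List.pyRange_one_eq_nil (by omega)]
    simp [pvInnerA, List.drop_length]
  | succ d ih =>
    intro j hj i hi hlen
    have hjk : j < kc.length := by omega
    have hsj : i.toNat + j < sc.length := by omega
    rw [PySem.List.pyRange_one_cons (by exact_mod_cast hjk)]
    have hidx : (i + (j : Int)) = ((i.toNat + j : Nat) : Int) := by omega
    have hget1 : PySem.List.pyGet? sc (i + (j : Int)) = some sc[i.toNat + j] := by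
      rw [hidx, PySem.List.pyGet?_natCast, List.getElem?_eq_getElem hsj]
    have hget2 : PySem.List.pyGet? kc ((j : Nat) : Int) = some kc[j] := by
      rw [PySem.List.pyGet?_natCast, List.getElem?_eq_getElem hjk]
    have hdropk : kc.drop j = kc[j] :: kc.drop (j + 1) := List.drop_eq_getElem_cons hjk
    have hdrops : sc.drop (i.toNat + j) = sc[i.toNat + j] :: sc.drop (i.toNat + j + 1) :=
      List.drop_eq_getElem_cons hsj
    simp only [pvInnerA, hget1, hget2]
    by_cases hc : sc[i.toNat + j] = kc[j]
    · rw [if_pos (by rw [hc])]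
      have h1 : i + (j : Int) + 1 = i + ((j + 1 : Nat) : Int) := by push_cast; ring
      rw [h1, show ((j:Int) + 1) = ((j + 1 : Nat) : Int) by push_cast; ring, ih (j + 1) (by omega) i hi hlen, hdropk, hdrops, hc]
      constructor
      · intro hp; exact List.cons_prefix_cons.mpr ⟨rfl, hp⟩
      · intro hp; exact (List.cons_prefix_cons.mp hp).2
    · rw [if_neg (by simp [hc])]
      apply iff_of_false
      · omega
      · rw [hdropk, hdrops]
        intro hp
        exact hc ((List.cons_prefix_cons.mp hp).1).symm

-- A's middle loop over i collects exactly the occurrence positions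
lemma pvTempA_eq (sc kc : List Char) :
    (PySem.List.pyRange 0 ((sc.length : Int) - (kc.length : Int) + 1)).foldl
      (fun temp i =>
        let index := pvInnerA sc kc (PySem.List.pyRange 0 (kc.length : Int)) i
        if index - i = (kc.length : Int) then temp ++ [i] else temp) [] = pvOcc sc kc 0 := by
  show (PySem.List.pyRange 0 ((sc.length : Int) - (kc.length : Int) + 1)).foldl
      (fun temp i =>
        if pvInnerA sc kc (PySem.List.pyRange 0 (kc.length : Int)) i - i = (kc.length : Int)
        then temp ++ [i] else temp) [] = pvOcc sc kc 0
  rw [PySem.List.foldl_append_ite_eq_filter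
        (fun i => pvInnerA sc kc (PySem.List.pyRange 0 (kc.length : Int)) i - i = (kc.length : Int))]
  rw [List.nil_append, pvOcc]
  apply List.filter_congr
  intro i hi
  have hm := PySem.List.mem_pyRange_one.mp hi
  have hi0 : 0 ≤ i := hm.1
  have hlen : i.toNat + kc.length ≤ sc.length := by omega
  have h := pvInnerA_iff sc kc kc.length 0 (by omega) i hi0 hlen
  simp only [Nat.cast_zero, add_zero, List.drop_zero] at h
  apply decide_eq_decide.mpr
  rw [← h]
  omega

-- find with a start past len(s) is -1 (CPython quirk, kept by PySem)
lemma pvFindFrom_past (s sub : List Char) (k : Nat) (h : s.length < k) :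
    PySem.Chars.findFrom s sub (k : Int) = -1 := by
  simp only [PySem.Chars.findFrom]
  split_ifs <;> first | rfl | omega

-- B's while loop collects exactly the occurrence positions from t on
lemma pvFindLoop_eq (s k : String) : ∀ (fuel t : Nat) (loc : List Int),
    t ≤ s.toList.length + 1 → s.toList.length + 2 ≤ fuel + t →
    pvFindLoop s k fuel (PySem.Chars.findFrom s.toList k.toList (t : Int)) loc
      = loc ++ pvOcc s.toList k.toList (t : Int) := by
  intro fuel
  induction fuel with
  | zero => intro t loc h1 h2; omega
  | succ f ih =>
    intro t loc h1 h2
    by_cases ht : t = s.toList.length + 1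
    · rw [ht, pvFindFrom_past s.toList k.toList _ (by omega)]
      simp only [pvFindLoop, ne_eq, not_true_eq_false, ite_false]
      have : pvOcc s.toList k.toList ((s.toList.length + 1 : Nat) : Int) = [] := by
        unfold pvOcc
        rw [PySem.List.pyRange_one_eq_nil (by push_cast; omega)]
        rfl
      rw [this, List.append_nil]
    · have htL : t ≤ s.toList.length := by omega
      by_cases hr : PySem.Chars.findFrom s.toList k.toList (t : Int) = -1
      · rw [hr]
        simp only [pvFindLoop, ne_eq, not_true_eq_false, ite_false]
        have hninf := (PySem.Chars.findFrom_natCast_eq_neg_one_iff s.toList k.toList t htL).mp hr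
        have : pvOcc s.toList k.toList (t : Int) = [] := by
          unfold pvOcc
          rw [List.filter_eq_nil_iff]
          intro i hi
          have hm := PySem.List.mem_pyRange_one.mp hi
          simp only [decide_eq_true_eq]
          intro hp
          apply hninf
          have hdd : s.toList.drop i.toNat = (s.toList.drop t).drop (i.toNat - t) := by
            rw [List.drop_drop]; congr 1; omega
          rw [hdd] at hp
          exact hp.isInfix.trans (List.drop_suffix _ _).isInfix
        rw [this, List.append_nil]
      · obtain ⟨hge, hpre, hmin⟩ := PySem.Chars.findFrom_natCast_spec s.toList k.toList t htL hr
        have hr0 : (0 : Int) ≤ PySem.Chars.findFrom s.toList k.toList (t : Int) :=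
          le_trans (by exact_mod_cast Nat.zero_le t) hge
        obtain ⟨n, hn⟩ : ∃ n : Nat, PySem.Chars.findFrom s.toList k.toList (t : Int) = (n : Int) :=
          ⟨_, (Int.toNat_of_nonneg hr0).symm⟩
        rw [hn] at hge hpre hmin hr ⊢
        simp only [Int.toNat_natCast] at hpre hmin
        have hge' : t ≤ n := by exact_mod_cast hge
        have hnle : n ≤ s.toList.length := by
          have hfl := PySem.Chars.findFrom_natCast s.toList k.toList t htL
          rw [hn] at hfl
          by_cases hf : PySem.Chars.find (s.toList.drop t) k.toList = -1
          · rw [if_pos hf] at hfl; omega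
          · rw [if_neg hf] at hfl
            have hle := PySem.Chars.find_le_length (s.toList.drop t) k.toList
            rw [List.length_drop] at hle
            omega
        have hnL : n + k.toList.length ≤ s.toList.length := by
          have := hpre.length_le
          rw [List.length_drop] at this
          omega
        rw [pvFindLoop, if_pos hr]
        have harg : PySem.Str.findFrom s k ((n : Int) + 1) none
            = PySem.Chars.findFrom s.toList k.toList ((n + 1 : Nat) : Int) := by
          rw [PySem.Str.findFrom_eq, show ((n : Int) + 1) = ((n + 1 : Nat) : Int) from by push_cast; ring]
        rw [harg, ih (n + 1) (loc ++ [(n : Int)]) (by omega) (by omega)]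
        suffices h : pvOcc s.toList k.toList (t : Int)
            = (n : Int) :: pvOcc s.toList k.toList ((n + 1 : Nat) : Int) by
          rw [h]; simp
        unfold pvOcc
        rw [PySem.List.pyRange_one_append (t : Int) (n : Int)
              ((s.toList.length : Int) - (k.toList.length : Int) + 1) hge (by omega),
            List.filter_append]
        have h1 : (PySem.List.pyRange (t : Int) (n : Int)).filter
            (fun i => decide (k.toList <+: s.toList.drop i.toNat)) = [] := by
          rw [List.filter_eq_nil_iff]
          intro i hi
          have hm := PySem.List.mem_pyRange_one.mp hi
          simp only [decide_eq_true_eq]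
          exact hmin i.toNat (by omega) (by omega)
        rw [h1, List.nil_append,
            PySem.List.pyRange_one_cons
              (by omega : (n : Int) < (s.toList.length : Int) - (k.toList.length : Int) + 1)]
        rw [List.filter_cons_of_pos (by simpa using hpre),
            show ((n : Int) + 1) = ((n + 1 : Nat) : Int) from by push_cast; ring]

-- ===== VERDICT (by name: the statement is the Claim_ definition above) =====
theorem s_match_spec : Claim_equal_s_match := by
  intro s s1 _
  unfold Spec_s_match s_match s_match_alt
  simp only
  have hA : ∀ (acc : List Int), ∀ k ∈ s1,
      (acc ++ (PySem.List.pyRange 0 ((s.toList.length : Int) - (k.toList.length : Int) + 1)).foldl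
        (fun temp i =>
          let index := pvInnerA s.toList k.toList (PySem.List.pyRange 0 (k.toList.length : Int)) i
          if index - i = (k.toList.length : Int) then temp ++ [i] else temp) [])
        = acc ++ pvOcc s.toList k.toList 0 := by
    intro acc k _
    rw [pvTempA_eq]
  have hB : ∀ (acc : List Int), ∀ k ∈ s1,
      pvFindLoop s k (s.toList.length + 2) (PySem.Str.find s k) acc
        = acc ++ pvOcc s.toList k.toList 0 := by
    intro acc k _
    have h0 : PySem.Str.find s k = PySem.Chars.findFrom s.toList k.toList ((0 : Nat) : Int) := by
      simp [PySem.Str.find_eq, PySem.Chars.findFrom_zero]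
    rw [h0, pvFindLoop_eq s k (s.toList.length + 2) 0 acc (by omega) (by omega)]
    norm_num
  congr 1
  rw [PySem.List.foldl_congr_mem s1 _ (fun loc k => loc ++ pvOcc s.toList k.toList 0) _ hA,
      PySem.List.foldl_congr_mem s1 _ (fun loc k => loc ++ pvOcc s.toList k.toList 0) _ hB]
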